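-- pv_equiv track=rewrite | github.com/HongMoonKi/Programmers | 프로그래머스/1/82612. 부족한 금액 계산하기/부족한 금액 계산하기.py | solution
-- ===== SOURCE A (Python) =====
-- def solution(price, money, count):
--     a = 1
--     result = 0
--     while a <= count:
--         result += price*a
--         a += 1
--
--     if result >= money:
--         return result - money
--     else:
--         return 0
-- ===== SOURCE B (Python) =====
-- def solution(price, money, count):
--     total = price * (count * (count + 1) // 2) if count >= 1 else 0
--     return max(total - money, 0)
-- ===== Notes on version B (the rewrite author's own statement) =====
-- stated objective: faster
-- what changed: Replaced the O(count) accumulation loop with the closed-form arithmetic-series formula price*count*(count+1)//2 and a max with 0.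
import Mathlib
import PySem

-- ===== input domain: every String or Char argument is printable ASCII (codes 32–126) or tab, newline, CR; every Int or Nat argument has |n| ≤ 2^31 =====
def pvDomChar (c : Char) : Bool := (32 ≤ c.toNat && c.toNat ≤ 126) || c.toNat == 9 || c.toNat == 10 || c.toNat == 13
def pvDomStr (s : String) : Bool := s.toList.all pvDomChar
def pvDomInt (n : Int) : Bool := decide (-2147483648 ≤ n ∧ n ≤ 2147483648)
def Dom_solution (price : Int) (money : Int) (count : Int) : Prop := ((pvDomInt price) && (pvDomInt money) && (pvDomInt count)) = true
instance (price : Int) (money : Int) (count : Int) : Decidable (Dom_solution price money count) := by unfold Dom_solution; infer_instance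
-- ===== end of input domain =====

-- B replaces A's O(count) accumulation loop by the closed-form arithmetic-series formula (faster).


-- ===== PORT A =====
-- the while loop: state (a, result)
def solutionLoop (price : Int) (count : Int) (a : Int) (result : Int) : Int :=
  if a ≤ count then solutionLoop price count (a + 1) (result + price * a)
  else result
termination_by (count + 1 - a).toNat
decreasing_by omega

def solution (price : Int) (money : Int) (count : Int) : Int :=
  let result := solutionLoop price count 1 0
  if result ≥ money then result - money else 0

-- ===== PORT B =====
def solution_alt (price : Int) (money : Int) (count : Int) : Int :=
  let total := if count ≥ 1 then price * (PySem.Int.floordiv (count * (count + 1)) 2) else 0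
  max (total - money) 0

-- ===== PRECONDITION & SPEC =====
def Spec_solution (price : Int) (money : Int) (count : Int) (out : Int) : Prop := out = solution_alt price money count
instance (price : Int) (money : Int) (count : Int) (out : Int) : Decidable (Spec_solution price money count out) := by unfold Spec_solution; infer_instance

-- ===== CLAIM (what is proved, stated in full; the proofs are below) =====
def Claim_equal_solution : Prop := ∀ (price : Int) (money : Int) (count : Int), Dom_solution price money count → Spec_solution price money count (solution price money count)

-- ===== LEMMAS AND PROOFS =====
theorem solutionLoop_closed (price count : Int) :
    ∀ (a result : Int), 1 ≤ a → a ≤ count + 1 → 2 * solutionLoop price count a result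
      = 2 * result + price * (count * (count + 1) - (a - 1) * a) := by
  intro a result
  induction a, result using solutionLoop.induct price count with
  | case1 a result h ih =>
      intro h1 _
      rw [solutionLoop, if_pos h, ih (by omega) (by omega)]
      ring
  | case2 a result h =>
      intro _ h2
      rw [solutionLoop, if_neg h]
      have : a = count + 1 := by omega
      subst this; ring

-- ===== VERDICT (by name: the statement is the Claim_ definition above) =====
theorem solution_spec : Claim_equal_solution := by
  intro price money count _
  unfold Spec_solution solution solution_alt
  by_cases hc : count ≥ 1
  · have h := solutionLoop_closed price count 1 0 (by omega) (by omega)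
    have hfd : PySem.Int.floordiv (count * (count + 1)) 2 = count * (count + 1) / 2 := by
      simp only [PySem.Int.floordiv]
      exact Int.fdiv_eq_ediv_of_nonneg _ (by norm_num)
    have heven : 2 * (count * (count + 1) / 2) = count * (count + 1) := by
      have : (2 : Int) ∣ count * (count + 1) := (Int.even_mul_succ_self count).two_dvd
      omega
    have hres : solutionLoop price count 1 0 = price * (count * (count + 1) / 2) := by
      have h2 : 2 * solutionLoop price count 1 0 = 2 * (price * (count * (count + 1) / 2)) := by
        rw [h]; rw [show 2 * (price * (count * (count + 1) / 2)) = price * (2 * (count * (count + 1) / 2)) by ring, heven]; ring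
      omega
    simp only [hfd, if_pos hc, hres]
    split_ifs with hm
    · omega
    · omega
  · have hres : solutionLoop price count 1 0 = 0 := by
      rw [solutionLoop, if_neg (by omega)]
    rw [hres]
    simp only [if_neg hc]
    split_ifs with hm <;> omega
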